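-- pv_equiv track=rewrite | github.com/ArthurJouan9/SAE_Crypto | src/decrypt_mess3.py | dechiffrer_adfgvx
-- ===== SOURCE A (Python) =====
-- GRILLE = (6, 6, "AJFB82YN9UX1GS0KPI3QOE74CZVHRLT5WD6M")
--
-- def separer_par_paires(message):
--     """
--     Sépare le message en paires de lettres ADFGVX.
--     """
--     res = []
--     paire = ""
--     for lettre in message:
--         if lettre.isalpha():
--             paire += lettre
--         else:
--             res.append(lettre)
--         if len(paire) == 2:
--             res.append(paire)
--             paire = ""
--     return res
--
-- def dechiffrer_adfgvx(message):
--     """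
--     Déchiffre un message en utilisant le code ADFGVX avec la grille prédéfinie.
--     """
--     res = ""
--     liste_paires = separer_par_paires(message)
--     symboles = ["A", "D", "F", "G", "V", "X"]
--
--     for paire in liste_paires:
--         if paire[0] in symboles and paire[1] in symboles:
--             indice1 = symboles.index(paire[0])
--             indice2 = symboles.index(paire[1])
--             res += GRILLE[2][indice1 * GRILLE[0] + indice2]
--         else:
--             res += paire
--     return res
-- ===== SOURCE B (Python) =====
-- GRILLE = (6, 6, "AJFB82YN9UX1GS0KPI3QOE74CZVHRLT5WD6M")
--
-- def _paires(letters):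
--     """Pair up consecutive letters into (a, b) tuples, two per step (odd tail dropped)."""
--     res = []
--     k = 0
--     while k + 1 < len(letters):
--         res.append((letters[k], letters[k + 1]))
--         k += 2
--     return res
--
-- def dechiffrer_adfgvx(message):
--     """Extract-decode-merge pipeline: pull out the letter subsequence, decode it
--     pairwise through a precomputed 36-entry pair table, then weave the decoded
--     characters back between the non-letters by counting letter parity."""
--     table = {(a, b): GRILLE[2][i * GRILLE[0] + j]
--              for i, a in enumerate("ADFGVX") for j, b in enumerate("ADFGVX")}
--     letters = [c for c in message if c.isalpha()]
--     decoded = [table.get(p, p[0] + p[1]) for p in _paires(letters)]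
--     out = []
--     seen = 0
--     it = iter(decoded)
--     for c in message:
--         if c.isalpha():
--             seen += 1
--             if seen % 2 == 0:
--                 out.append(next(it))
--         else:
--             out.append(c)
--     return "".join(out)
-- ===== Notes on version B (the rewrite author's own statement) =====
-- stated objective: alternative
-- what changed: Replaces A's tokenise-then-decode two-loop design (pair buffer building an intermediate token list, then per-token list.index scans into the grid) with an extract-decode-merge pipeline: filter out the letter subsequence, decode it pairwise through a precomputed 36-entry pair-to-character table, then weave the decoded characters back between the non-letters by counting letter parity.
import Mathlib
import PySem

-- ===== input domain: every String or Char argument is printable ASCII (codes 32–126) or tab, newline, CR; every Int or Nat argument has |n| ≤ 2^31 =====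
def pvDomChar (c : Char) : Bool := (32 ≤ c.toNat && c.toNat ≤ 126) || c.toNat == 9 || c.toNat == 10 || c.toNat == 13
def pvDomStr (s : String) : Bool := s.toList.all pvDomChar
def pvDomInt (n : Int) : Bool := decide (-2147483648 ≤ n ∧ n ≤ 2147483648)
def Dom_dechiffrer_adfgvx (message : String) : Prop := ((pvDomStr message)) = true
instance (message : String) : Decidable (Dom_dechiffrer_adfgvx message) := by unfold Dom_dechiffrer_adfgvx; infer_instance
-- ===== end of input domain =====

-- B is an extract-decode-merge pipeline (letter subsequence, pairwise table decode, parity merge) instead of A's tokenise-then-decode loops; same return value.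

-- ===== PORT A =====
-- GRILLE[2] as a list of characters
def pvGrid : List Char :=
  ['A','J','F','B','8','2','Y','N','9','U','X','1','G','S','0','K','P','I',
   '3','Q','O','E','7','4','C','Z','V','H','R','L','T','5','W','D','6','M']

-- symboles = ["A","D","F","G","V","X"] (one-character strings, represented as chars)
def pvSymb : List Char := ['A','D','F','G','V','X']

-- one iteration of separer_par_paires' loop: state (res, paire)
def pvSepStep (st : List (List Char) × List Char) (c : Char) : List (List Char) × List Char :=
  let st1 := if PySem.Chars.isalpha c then (st.1, st.2 ++ [c]) else (st.1 ++ [[c]], st.2)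
  if st1.2.length = 2 then (st1.1 ++ [st1.2], []) else st1

def separer_par_paires (cs : List Char) : List (List Char) :=
  (cs.foldl pvSepStep ([], [])).1

-- the body of A's decoding loop: paire[0]/paire[1] with Python's short-circuit.
-- Tokens are never empty, and paire[1] is only read after paire[0] ∈ symboles
-- (then the token has length 2), so the two fallback `=> t` arms for a missing
-- index (where Python would raise IndexError) are unreachable.
def pvDecTok (t : List Char) : List Char :=
  match t with
  | [] => t
  | c0 :: rest =>
    if c0 ∈ pvSymb then
      match rest with
      | [] => t
      | c1 :: _ =>
        if c1 ∈ pvSymb then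
          let i1 := pvSymb.idxOf c0          -- symboles.index(paire[0])
          let i2 := pvSymb.idxOf c1
          [pvGrid.getD (i1 * 6 + i2) ' ']    -- GRILLE[2][i1*GRILLE[0]+i2]; index < 36 always
        else t
    else t

def dechiffrer_adfgvx (message : String) : String :=
  String.ofList ((separer_par_paires message.toList).foldl (fun r t => r ++ pvDecTok t) [])

-- ===== PORT B =====
-- "ADFGVX"
def pvSymbS : List Char := ['A','D','F','G','V','X']

-- table = {(a, b): GRILLE[2][i*GRILLE[0]+j] for i, a in enumerate("ADFGVX") for j, b in enumerate("ADFGVX")}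
def pvTable : PySem.Dict (Char × Char) Char :=
  PySem.Dict.mk ((PySem.List.enumerate pvSymbS).flatMap (fun ia =>
    (PySem.List.enumerate pvSymbS).map (fun jb =>
      ((ia.2, jb.2), PySem.List.pyGetD pvGrid (ia.1 * 6 + jb.1) ' '))))

-- _paires: the k += 2 while loop, as recursion consuming two letters per step; odd tail dropped
def pvPairs : List Char → List (Char × Char)
  | a :: b :: rest => (a, b) :: pvPairs rest
  | _ => []

-- table.get(p, p[0] + p[1]) as a 1- or 2-char string
def pvDecPair (p : Char × Char) : List Char :=
  match pvTable.get? p with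
  | some c => [c]
  | none => [p.1, p.2]

-- one iteration of the merge loop: state (out, seen, remaining decoded iterator)
def pvMergeStep (st : List Char × Nat × List (List Char)) (c : Char) :
    List Char × Nat × List (List Char) :=
  if PySem.Chars.isalpha c then
    let seen := st.2.1 + 1
    if seen % 2 = 0 then
      match st.2.2 with
      | d :: rest => (st.1 ++ d, seen, rest)
      | [] => (st.1, seen, [])   -- unreachable: the iterator always has an element here
    else (st.1, seen, st.2.2)
  else (st.1 ++ [c], st.2.1, st.2.2)

def dechiffrer_adfgvx_alt (message : String) : String :=
  let letters := message.toList.filter PySem.Chars.isalpha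
  let decoded := (pvPairs letters).map pvDecPair
  String.ofList (message.toList.foldl pvMergeStep ([], 0, decoded)).1

-- ===== PRECONDITION & SPEC =====
def Spec_dechiffrer_adfgvx (message : String) (out : String) : Prop := out = dechiffrer_adfgvx_alt message
instance (message : String) (out : String) : Decidable (Spec_dechiffrer_adfgvx message out) := by unfold Spec_dechiffrer_adfgvx; infer_instance

-- ===== CLAIM (what is proved, stated in full; the proofs are below) =====
def Claim_equal_dechiffrer_adfgvx : Prop := ∀ (message : String), Dom_dechiffrer_adfgvx message → Spec_dechiffrer_adfgvx message (dechiffrer_adfgvx message)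

-- ===== LEMMAS AND PROOFS =====

lemma pv_alpha_of_mem_symb {c : Char} (h : c ∈ pvSymb) : PySem.Chars.isalpha c = true := by
  simp [pvSymb, List.mem_cons] at h
  rcases h with rfl | rfl | rfl | rfl | rfl | rfl <;> decide

lemma pv_table_lit : pvTable =
  PySem.Dict.mk [(('A', 'A'), 'A'), (('A', 'D'), 'J'), (('A', 'F'), 'F'), (('A', 'G'), 'B'), (('A', 'V'), '8'), (('A', 'X'), '2'), (('D', 'A'), 'Y'), (('D', 'D'), 'N'), (('D', 'F'), '9'), (('D', 'G'), 'U'), (('D', 'V'), 'X'), (('D', 'X'), '1'), (('F', 'A'), 'G'), (('F', 'D'), 'S'), (('F', 'F'), '0'), (('F', 'G'), 'K'), (('F', 'V'), 'P'), (('F', 'X'), 'I'), (('G', 'A'), '3'), (('G', 'D'), 'Q'), (('G', 'F'), 'O'), (('G', 'G'), 'E'), (('G', 'V'), '7'), (('G', 'X'), '4'), (('V', 'A'), 'C'), (('V', 'D'), 'Z'), (('V', 'F'), 'V'), (('V', 'G'), 'H'), (('V', 'V'), 'R'), (('V', 'X'), 'L'), (('X', 'A'), 'T'), (('X', 'D'),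 '5'), (('X', 'F'), 'W'), (('X', 'G'), 'D'), (('X', 'V'), '6'), (('X', 'X'), 'M')] := by decide

lemma pv_table_none {a b : Char} (h : ¬(a ∈ pvSymb ∧ b ∈ pvSymb)) :
    pvTable.get? (a, b) = none := by
  rw [pv_table_lit]
  by_cases ha : a ∈ pvSymb
  · have hb : b ∉ pvSymb := fun hb => h ⟨ha, hb⟩
    simp [pvSymb, not_or] at hb
    obtain ⟨b1, b2, b3, b4, b5, b6⟩ := hb
    simp [pvSymb] at ha
    rcases ha with rfl | rfl | rfl | rfl | rfl | rfl <;>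
      simp [PySem.Dict.get?, Ne.symm b1, Ne.symm b2, Ne.symm b3,
        Ne.symm b4, Ne.symm b5, Ne.symm b6]
  · simp [pvSymb, not_or] at ha
    obtain ⟨a1, a2, a3, a4, a5, a6⟩ := ha
    simp [PySem.Dict.get?, Ne.symm a1, Ne.symm a2, Ne.symm a3,
      Ne.symm a4, Ne.symm a5, Ne.symm a6]

-- B's table decoding of a pair equals A's decoding of the two-letter token
lemma pv_decPair_eq (a b : Char) : pvDecPair (a, b) = pvDecTok [a, b] := by
  by_cases ha : a ∈ pvSymb
  · by_cases hb : b ∈ pvSymb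
    · simp [pvSymb, List.mem_cons] at ha hb
      rcases ha with rfl | rfl | rfl | rfl | rfl | rfl <;>
        rcases hb with rfl | rfl | rfl | rfl | rfl | rfl <;> rfl
    · simp [pvDecPair, pvDecTok, pv_table_none (fun hc => hb hc.2), ha, hb]
  · simp [pvDecPair, pvDecTok, pv_table_none (fun hc => ha hc.1), ha]

lemma pv_decTok_single {c : Char} (h : PySem.Chars.isalpha c = false) : pvDecTok [c] = [c] := by
  have : c ∉ pvSymb := fun hm => by simp [pv_alpha_of_mem_symb hm] at h
  simp [pvDecTok, this]

-- main loop invariant: A's (token list, pending pair) against B's merge state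
lemma pv_loop_eq : ∀ (l : List Char) (acc : List (List Char)) (p out : List Char) (n : Nat),
    out = acc.flatMap pvDecTok →
    n % 2 = p.length % 2 →
    p.length ≤ 1 →
    (l.foldl pvSepStep (acc, p)).1.flatMap pvDecTok
      = (l.foldl pvMergeStep (out, n, (pvPairs (p ++ l.filter PySem.Chars.isalpha)).map pvDecPair)).1 := by
  intro l
  induction l with
  | nil => intro acc p out n hout _ _; simpa using hout.symm
  | cons c l ih =>
    intro acc p out n hout hn hlen
    by_cases hc : PySem.Chars.isalpha c = true
    · have hf : List.filter PySem.Chars.isalpha (c :: l) = c :: List.filter PySem.Chars.isalpha l := by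
        simp [hc]
      rcases p with _ | ⟨c0, _ | ⟨c1, p⟩⟩
      · have hn0 : n % 2 = 0 := by simpa using hn
        have hodd : ¬ ((n + 1) % 2 = 0) := by omega
        simp only [List.foldl_cons, pvSepStep, pvMergeStep, hc, if_true, hf,
          List.nil_append, List.length_nil, List.length_cons,
          Nat.zero_add, if_neg hodd]
        exact ih acc [c] out (n + 1) hout (by simpa using (by omega : (n + 1) % 2 = 1)) (by simp)
      · have hn1 : n % 2 = 1 := by simpa using hn
        have heven : (n + 1) % 2 = 0 := by omega
        simp only [List.foldl_cons, pvSepStep, pvMergeStep, hc, if_true, hf,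
          List.cons_append, List.nil_append, List.length_cons, List.length_nil,
          if_pos heven, pvPairs, List.map_cons]
        exact ih (acc ++ [[c0, c]]) [] (out ++ pvDecPair (c0, c)) (n + 1)
          (by simp [hout, pv_decPair_eq]) (by simpa using heven) (by simp)
      · simp at hlen
    · have hc' : PySem.Chars.isalpha c = false := by simpa using hc
      have hf : List.filter PySem.Chars.isalpha (c :: l) = List.filter PySem.Chars.isalpha l := by
        simp [hc']
      have hlen2 : ¬ (p.length = 2) := by omega
      simp only [List.foldl_cons, pvSepStep, pvMergeStep, hc', Bool.false_eq_true, if_false,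
        if_neg hlen2, hf]
      exact ih (acc ++ [[c]]) p (out ++ [c]) n
        (by simp [hout, pv_decTok_single hc']) hn hlen

-- ===== VERDICT (by name: the statement is the Claim_ definition above) =====
theorem dechiffrer_adfgvx_spec : Claim_equal_dechiffrer_adfgvx := by
  intro message _
  unfold Spec_dechiffrer_adfgvx dechiffrer_adfgvx dechiffrer_adfgvx_alt separer_par_paires
  rw [PySem.List.foldl_append_eq_flatMap]
  simp only [List.nil_append]
  rw [pv_loop_eq message.toList [] [] [] 0 rfl rfl (by simp)]
  rfl
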